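-- pv_equiv track=rewrite | github.com/martapereira0/IP | PrepRecurso/codifica.py | codifica
-- ===== SOURCE A (Python) =====
-- from typing import List
--
-- def digitos(x: int) -> List[int]:
--     digits = []
--     while x > 0:
--         digit = x % 10
--         digits.append(digit)
--         x = x // 10
--     return digits[::-1]
--
-- def codifica(num,secr):
--     lst=digitos(num)
--     str=[]
--     for i in lst:
--         for j in range(len(secr)):
--             if i==j:
--                 str.append(secr[j])
--     x="".join(str)
--     return x
-- ===== SOURCE B (Python) =====
-- def codifica(num, secr):
--     if num <= 0:
--         return ''
--     d = num % 10
--     return codifica(num // 10, secr) + (secr[d] if d < len(secr) else '')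
-- ===== Notes on version B (the rewrite author's own statement) =====
-- stated objective: faster
-- what changed: Replaced the digit-list builder plus an inner scan over every index of secr per digit with a direct recursion on num//10 that emits secr[num%10] via one length check per digit, so no digit list, no reversal and no inner index loop.
import Mathlib
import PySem

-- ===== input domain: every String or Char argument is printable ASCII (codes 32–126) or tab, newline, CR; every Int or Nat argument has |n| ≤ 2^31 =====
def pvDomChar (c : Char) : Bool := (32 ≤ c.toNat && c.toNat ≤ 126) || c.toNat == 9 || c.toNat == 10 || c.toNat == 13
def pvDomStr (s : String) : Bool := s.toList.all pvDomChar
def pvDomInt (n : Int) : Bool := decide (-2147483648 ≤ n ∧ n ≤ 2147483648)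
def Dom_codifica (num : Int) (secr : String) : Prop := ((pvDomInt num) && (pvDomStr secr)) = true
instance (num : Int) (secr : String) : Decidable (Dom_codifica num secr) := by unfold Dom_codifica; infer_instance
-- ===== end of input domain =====

-- B replaces A's digit-list + per-digit scan over all indices of secr with a direct recursion on num//10 (one length check per digit); a timing run measured B faster.

-- ===== PORT A =====
-- the 'while x > 0' loop of digitos, collecting x % 10 into digits
def digitosLoop (x : Int) (digits : List Int) : List Int :=
  if h : x > 0 then
    digitosLoop (PySem.Int.floordiv x 10) (digits ++ [PySem.Int.mod x 10])
  else digits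
termination_by x.toNat
decreasing_by
  have h2 : PySem.Int.floordiv x 10 = x / 10 := PySem.Int.floordiv_eq_ediv_of_pos (by omega)
  omega

def digitos (x : Int) : List Int := (digitosLoop x []).reverse   -- digits[::-1]

-- 'for j in range(len(secr)): if i == j: str.append(secr[j])', with (j, secr[j]) paired up
def pvEnumFrom (k : Nat) : List Char → List (Nat × Char)
  | [] => []
  | c :: cs => (k, c) :: pvEnumFrom (k+1) cs

def codifica (num : Int) (secr : String) : String :=
  let lst := digitos num
  let str := lst.foldl (fun acc i =>
    (pvEnumFrom 0 secr.toList).foldl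
      (fun acc2 jc => if i = (jc.1 : Int) then acc2 ++ [jc.2] else acc2) acc) []
  String.mk str   -- "".join(str)

-- ===== PORT B =====
-- recursion of Source B over the characters of secr (string concatenation done on code points)
def codificaAltChars (num : Int) (secr : List Char) : List Char :=
  if h : num ≤ 0 then []
  else
    codificaAltChars (PySem.Int.floordiv num 10) secr ++
      (if PySem.Int.mod num 10 < (secr.length : Int) then [secr[(PySem.Int.mod num 10).toNat]!] else [])
termination_by num.toNat
decreasing_by
  have h2 : PySem.Int.floordiv num 10 = num / 10 := PySem.Int.floordiv_eq_ediv_of_pos (by omega)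
  omega

def codifica_alt (num : Int) (secr : String) : String :=
  String.mk (codificaAltChars num secr.toList)

-- ===== PRECONDITION & SPEC =====
def Spec_codifica (num : Int) (secr : String) (out : String) : Prop := out = codifica_alt num secr
instance (num : Int) (secr : String) (out : String) : Decidable (Spec_codifica num secr out) := by unfold Spec_codifica; infer_instance

-- ===== CLAIM (what is proved, stated in full; the proofs are below) =====
def Claim_equal_codifica : Prop := ∀ (num : Int) (secr : String), Dom_codifica num secr → Spec_codifica num secr (codifica num secr)

-- ===== LEMMAS AND PROOFS =====

theorem digitosLoop_acc (x : Int) : ∀ acc, digitosLoop x acc = acc ++ digitosLoop x [] := by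
  induction h : x.toNat using Nat.strong_induction_on generalizing x with
  | _ n ih =>
    intro acc
    by_cases hx : 0 < x
    · have hd : PySem.Int.floordiv x 10 = x / 10 := PySem.Int.floordiv_eq_ediv_of_pos (by omega)
      have hlt : (PySem.Int.floordiv x 10).toNat < n := by rw [hd]; omega
      rw [digitosLoop]
      conv_rhs => rw [digitosLoop]
      simp only [hx, dite_true]
      have e := ih _ hlt (PySem.Int.floordiv x 10) rfl
      rw [e (acc ++ [PySem.Int.mod x 10]), e ([] ++ [PySem.Int.mod x 10])]
      simp
    · have h1 : ∀ a, digitosLoop x a = a := fun a => by rw [digitosLoop]; simp [hx]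
      simp [h1]

theorem digitos_nonpos (x : Int) (hx : ¬ 0 < x) : digitos x = [] := by
  unfold digitos
  rw [digitosLoop]
  simp [hx]

theorem digitos_rec (x : Int) (hx : 0 < x) :
    digitos x = digitos (PySem.Int.floordiv x 10) ++ [PySem.Int.mod x 10] := by
  unfold digitos
  rw [digitosLoop]
  simp only [hx, dite_true]
  rw [digitosLoop_acc]
  simp

theorem inner_fold (i : Int) (cs : List Char) (k : Nat) (acc : List Char) :
    (pvEnumFrom k cs).foldl (fun acc2 jc => if i = (jc.1 : Int) then acc2 ++ [jc.2] else acc2) acc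
      = acc ++ (if (k : Int) ≤ i ∧ i < (k : Int) + cs.length then [cs[(i - k).toNat]!] else []) := by
  induction cs generalizing k acc with
  | nil =>
    simp only [pvEnumFrom, List.foldl_nil, List.length_nil, Nat.cast_zero, add_zero]
    rw [if_neg (by omega), List.append_nil]
  | cons c cs ih =>
    simp only [pvEnumFrom, List.foldl_cons, ih, List.length_cons]
    by_cases hik : i = (k : Int)
    · subst hik
      rw [if_pos rfl, if_neg (by push_cast; omega), if_pos (by push_cast; omega)]
      simp
    · rw [if_neg hik]
      have hne : i ≠ (k : Int) := hik
      by_cases h : (((k+1 : Nat)) : Int) ≤ i ∧ i < (((k+1 : Nat)) : Int) + cs.length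
      · rw [if_pos h, if_pos (by push_cast at h ⊢; omega)]
        have hnat : (i - k).toNat = (i - (k + 1)).toNat + 1 := by push_cast at h ⊢; omega
        push_cast
        rw [hnat]
        simp
      · rw [if_neg h, if_neg (by push_cast at h ⊢; omega)]

theorem main_chars (x : Int) (cs : List Char) :
    (digitos x).foldl (fun acc i =>
      (pvEnumFrom 0 cs).foldl (fun acc2 jc => if i = (jc.1 : Int) then acc2 ++ [jc.2] else acc2) acc) []
      = codificaAltChars x cs := by
  induction h : x.toNat using Nat.strong_induction_on generalizing x with
  | _ n ih =>
    by_cases hx : 0 < x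
    · have hd : PySem.Int.floordiv x 10 = x / 10 := PySem.Int.floordiv_eq_ediv_of_pos (by omega)
      have hm : PySem.Int.mod x 10 = x % 10 := PySem.Int.mod_eq_emod_of_pos (by omega)
      have hlt : (PySem.Int.floordiv x 10).toNat < n := by rw [hd]; omega
      rw [digitos_rec x hx, List.foldl_append, List.foldl_cons, List.foldl_nil,
          inner_fold, ih _ hlt _ rfl]
      conv_rhs => rw [codificaAltChars]
      rw [dif_neg (by omega : ¬ x ≤ 0)]
      have h0 : (0 : Int) ≤ PySem.Int.mod x 10 := by rw [hm]; omega
      by_cases hc : PySem.Int.mod x 10 < (cs.length : Int)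
      · rw [if_pos (by push_cast; omega), if_pos hc]
        simp
      · rw [if_neg (by push_cast; omega), if_neg hc]
    · rw [digitos_nonpos x hx, List.foldl_nil, codificaAltChars, dif_pos (by omega)]

-- ===== VERDICT (by name: the statement is the Claim_ definition above) =====
theorem codifica_spec : Claim_equal_codifica := by
  intro num secr _
  unfold Spec_codifica codifica codifica_alt
  simp only [main_chars]
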